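-- pv_equiv track=rewrite | github.com/senya-2011/-computer-networks-course | lab1/code/scrambler_encoding.py | max_run_length
-- ===== SOURCE A (Python) =====
-- def max_run_length(bits):
--     best, cur = 1, 1
--     for i in range(1, len(bits)):
--         if bits[i] == bits[i - 1]:
--             cur += 1
--         else:
--             best = max(best, cur)
--             cur = 1
--     return max(best, cur)
-- ===== SOURCE B (Python) =====
-- from itertools import groupby
--
--
-- def max_run_length(bits):
--     return max((sum(1 for _ in g) for _, g in groupby(bits)), default=1)
-- ===== Notes on version B (the rewrite author's own statement) =====
-- stated objective: idiomatic
-- what changed: Replaces the index loop with per-element best/cur bookkeeping by an itertools.groupby run partition: compute each maximal run's length and take the max with default 1.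
import Mathlib
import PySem

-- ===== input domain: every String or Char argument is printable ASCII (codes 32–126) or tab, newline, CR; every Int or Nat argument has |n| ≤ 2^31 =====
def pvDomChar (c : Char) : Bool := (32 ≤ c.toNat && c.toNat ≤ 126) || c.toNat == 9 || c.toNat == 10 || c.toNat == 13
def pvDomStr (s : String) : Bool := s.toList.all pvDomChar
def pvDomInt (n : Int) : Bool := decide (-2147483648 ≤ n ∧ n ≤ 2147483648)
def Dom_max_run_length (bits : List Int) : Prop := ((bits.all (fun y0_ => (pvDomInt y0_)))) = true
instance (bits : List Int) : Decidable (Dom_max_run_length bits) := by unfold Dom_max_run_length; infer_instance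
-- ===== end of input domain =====

-- B replaces A's per-element best/cur bookkeeping by a groupby-style run partition
-- (lengths of maximal equal runs, max with default 1); same cost, more idiomatic.

-- ===== PORT A =====
def max_run_length (bits : List Int) : Int :=
  let bc := (PySem.List.pyRange 1 (bits.length : Int) 1).foldl
    (fun (s : Int × Int) i =>
      if PySem.List.pyGetD bits i 0 = PySem.List.pyGetD bits (i - 1) 0
      then (s.1, s.2 + 1)
      else (max s.1 s.2, 1)) (1, 1)
  max bc.1 bc.2

-- ===== PORT B =====
-- groupby: collect the lengths of the maximal runs of equal elements
def runsGo (v c : Int) : List Int → List Int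
  | [] => [c]
  | y :: ys => if y = v then runsGo v (c + 1) ys else c :: runsGo y 1 ys

def runLens : List Int → List Int
  | [] => []
  | x :: xs => runsGo x 1 xs

-- max over the run lengths, with default 1 for the empty sequence
def max_run_length_alt (bits : List Int) : Int :=
  (runLens bits).foldl max 1

-- ===== PRECONDITION & SPEC =====
def Spec_max_run_length (bits : List Int) (out : Int) : Prop := out = max_run_length_alt bits
instance (bits : List Int) (out : Int) : Decidable (Spec_max_run_length bits out) := by unfold Spec_max_run_length; infer_instance

-- ===== CLAIM (what is proved, stated in full; the proofs are below) =====
def Claim_equal_max_run_length : Prop := ∀ (bits : List Int), Dom_max_run_length bits → Spec_max_run_length bits (max_run_length bits)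

-- ===== LEMMAS AND PROOFS =====

-- structural companion of A's index loop: scan with previous element carried along
def pairGo (p : Int) (s : Int × Int) : List Int → Int × Int
  | [] => s
  | y :: ys => pairGo y (if y = p then (s.1, s.2 + 1) else (max s.1 s.2, 1)) ys

theorem pyGetD_cons_succ_of_nonneg (z : Int) (bits : List Int) (i : Int) (d : Int)
    (h : 0 ≤ i) :
    PySem.List.pyGetD (z :: bits) (i + 1) d = PySem.List.pyGetD bits i d := by
  obtain ⟨n, rfl⟩ := Int.eq_ofNat_of_zero_le h
  have : ((n : Int) + 1) = ((n + 1 : Nat) : Int) := by push_cast; ring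
  rw [this, PySem.List.pyGetD_natCast, PySem.List.pyGetD_natCast]
  rfl

-- shifting the index window: the fold on (z :: bits) over [a+1, b+1) equals the fold on bits over [a, b)
theorem shift_fold (z : Int) (bits : List Int) (a b : Int) (s : Int × Int) (ha : 1 ≤ a) :
    (PySem.List.pyRange (a + 1) (b + 1) 1).foldl
      (fun (s : Int × Int) i =>
        if PySem.List.pyGetD (z :: bits) i 0 = PySem.List.pyGetD (z :: bits) (i - 1) 0
        then (s.1, s.2 + 1) else (max s.1 s.2, 1)) s
    = (PySem.List.pyRange a b 1).foldl
      (fun (s : Int × Int) i =>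
        if PySem.List.pyGetD bits i 0 = PySem.List.pyGetD bits (i - 1) 0
        then (s.1, s.2 + 1) else (max s.1 s.2, 1)) s := by
  have hmap : PySem.List.pyRange (a + 1) (b + 1) 1
      = (PySem.List.pyRange a b 1).map (· + 1) := by
    rw [PySem.List.pyRange_one, PySem.List.pyRange_one]
    have : (b + 1 - (a + 1)) = b - a := by ring
    rw [this, List.map_map]
    apply List.map_congr_left
    intro k _
    simp; ring
  rw [hmap, List.foldl_map]
  apply PySem.List.foldl_congr_mem
  intro acc x hx
  have hx' := (PySem.List.mem_pyRange_one).1 hx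
  have h0 : 0 ≤ x - 1 := by omega
  have e1 : PySem.List.pyGetD (z :: bits) (x + 1) 0 = PySem.List.pyGetD bits x 0 :=
    pyGetD_cons_succ_of_nonneg z bits x 0 (by omega)
  have e2 : PySem.List.pyGetD (z :: bits) (x + 1 - 1) 0 = PySem.List.pyGetD bits (x - 1) 0 := by
    have : x + 1 - 1 = (x - 1) + 1 := by ring
    rw [this, pyGetD_cons_succ_of_nonneg z bits (x - 1) 0 h0]
  rw [e1, e2]

-- A's index fold over a cons list is the structural scan pairGo
theorem fold_eq_pairGo (xs : List Int) : ∀ (x : Int) (s : Int × Int),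
    (PySem.List.pyRange 1 ((x :: xs).length : Int) 1).foldl
      (fun (s : Int × Int) i =>
        if PySem.List.pyGetD (x :: xs) i 0 = PySem.List.pyGetD (x :: xs) (i - 1) 0
        then (s.1, s.2 + 1) else (max s.1 s.2, 1)) s
    = pairGo x s xs := by
  induction xs with
  | nil =>
    intro x s
    simp [PySem.List.pyRange_one_eq_nil, pairGo]
  | cons y ys ih =>
    intro x s
    have hlen : (((x :: y :: ys).length : Nat) : Int) = (ys.length : Int) + 2 := by
      simp; ring
    rw [hlen, PySem.List.pyRange_one_cons (by omega)]
    rw [List.foldl_cons]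
    have hstep : (if PySem.List.pyGetD (x :: y :: ys) 1 0
        = PySem.List.pyGetD (x :: y :: ys) (1 - 1) 0
        then (s.1, s.2 + 1) else (max s.1 s.2, (1 : Int)))
        = (if y = x then (s.1, s.2 + 1) else (max s.1 s.2, (1 : Int))) := by
      have h1 : PySem.List.pyGetD (x :: y :: ys) 1 0 = y := by
        have : (1 : Int) = ((1 : Nat) : Int) := rfl
        rw [this, PySem.List.pyGetD_natCast]; rfl
      have h0 : PySem.List.pyGetD (x :: y :: ys) (1 - 1) 0 = x := by
        norm_num [PySem.List.pyGetD_zero_cons]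
      rw [h1, h0]
    rw [hstep]
    have hsh : ((ys.length : Int) + 2) = ((ys.length : Int) + 1) + 1 := by ring
    rw [hsh, shift_fold x (y :: ys) 1 ((ys.length : Int) + 1) _ le_rfl]
    have hlen2 : ((ys.length : Int) + 1) = (((y :: ys).length : Nat) : Int) := by
      simp
    rw [hlen2, ih y _]
    rfl

-- bridging pairGo and B's run lengths
theorem pairGo_eq_runsGo (xs : List Int) : ∀ (x b c : Int),
    max (pairGo x (b, c) xs).1 (pairGo x (b, c) xs).2
    = (runsGo x c xs).foldl max b := by
  induction xs with
  | nil => intro x b c; simp [pairGo, runsGo]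
  | cons y ys ih =>
    intro x b c
    by_cases h : y = x
    · subst h
      simpa only [pairGo, runsGo, if_true, eq_self_iff_true] using ih y b (c + 1)
    · simp only [pairGo, runsGo, if_neg h, List.foldl_cons]
      exact ih y (max b c) 1

-- ===== VERDICT (by name: the statement is the Claim_ definition above) =====
theorem max_run_length_spec : Claim_equal_max_run_length := by
  intro bits _
  unfold Spec_max_run_length max_run_length max_run_length_alt
  cases bits with
  | nil => simp [PySem.List.pyRange_one_eq_nil, runLens]
  | cons x xs =>
    simp only [runLens]
    rw [fold_eq_pairGo xs x (1, 1)]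
    exact pairGo_eq_runsGo xs x 1 1
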